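-- pv_equiv track=rewrite | github.com/LeeGukHeon/Autobot | autobot/models/train_v5_fusion.py | _panel_order_preserving_intersection
-- ===== SOURCE A (Python) =====
-- def _panel_order_preserving_intersection(markets_by_expert: dict[str, list[str]]) -> list[str]:
--     ordered_source = list(markets_by_expert.get("panel") or [])
--     if not ordered_source:
--         for values in markets_by_expert.values():
--             if values:
--                 ordered_source = list(values)
--                 break
--     if not ordered_source:
--         return []
--     intersection = set(ordered_source)
--     for values in markets_by_expert.values():
--         if not values:
--             intersection = set()
--             break
--         intersection &= set(values)
--     return [market for market in ordered_source if market in intersection]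
-- ===== SOURCE B (Python) =====
-- def _panel_order_preserving_intersection(markets_by_expert: dict[str, list[str]]) -> list[str]:
--     ordered_source = list(markets_by_expert.get("panel") or [])
--     if not ordered_source:
--         for values in markets_by_expert.values():
--             if values:
--                 ordered_source = list(values)
--                 break
--     if not ordered_source:
--         return []
--     counts = {}
--     for values in markets_by_expert.values():
--         for market in set(values):
--             counts[market] = counts.get(market, 0) + 1
--     n = len(markets_by_expert)
--     common = {market for market, count in counts.items() if count == n}
--     return [market for market in ordered_source if market in common]
-- ===== Notes on version B (the rewrite author's own statement) =====
-- stated objective: alternative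
-- what changed: Replaces the repeated set-intersection loop (building a fresh set and intersecting per expert) with a single counting pass: one membership counter over the distinct markets of each expert list, keeping exactly the markets whose count equals the number of experts; the ordered_source resolution and order-preserving filter stay the same.
import Mathlib
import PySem

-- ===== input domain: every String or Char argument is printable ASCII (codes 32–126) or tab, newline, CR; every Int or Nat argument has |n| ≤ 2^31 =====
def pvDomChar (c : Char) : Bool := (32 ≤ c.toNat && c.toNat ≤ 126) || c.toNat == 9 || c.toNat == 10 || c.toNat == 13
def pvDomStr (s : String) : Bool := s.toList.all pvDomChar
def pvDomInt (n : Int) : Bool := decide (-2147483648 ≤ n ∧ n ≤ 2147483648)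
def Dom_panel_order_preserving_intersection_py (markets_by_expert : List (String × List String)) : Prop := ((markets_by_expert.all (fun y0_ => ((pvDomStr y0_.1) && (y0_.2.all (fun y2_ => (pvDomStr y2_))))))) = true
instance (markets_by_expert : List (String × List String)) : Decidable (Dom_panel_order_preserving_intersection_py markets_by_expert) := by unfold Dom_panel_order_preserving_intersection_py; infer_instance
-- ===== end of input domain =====

-- B replaces A's per-expert set-intersection loop with a single membership counter
-- (count of expert lists containing each distinct market, kept iff count = number of experts);
-- return values proved equal on all inputs in the domain.


-- ===== PORT A =====
-- shared by both ports (both Pythons resolve ordered_source identically):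
-- 'for values in d.values(): if values: ordered_source = list(values); break'
def pvFirstNonEmpty : List (List String) → List String
  | [] => []
  | v :: rest => if v = [] then pvFirstNonEmpty rest else v

-- A's loop: 'for values in d.values(): if not values: intersection = set(); break; intersection &= set(values)'
def pvInterLoop : List (List String) → PySem.Set String → PySem.Set String
  | [], s => s
  | v :: rest, s => if v = [] then PySem.Set.empty else pvInterLoop rest (PySem.Set.inter s (PySem.Set.ofList v))

def panel_order_preserving_intersection_py (markets_by_expert : List (String × List String)) : List String :=
  let d := PySem.Dict.ofList markets_by_expert
  let ordered_source := (d.get? "panel").getD []      -- markets_by_expert.get("panel") or []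
  let ordered_source := if ordered_source = [] then pvFirstNonEmpty d.values else ordered_source
  if ordered_source = [] then []
  else
    let intersection := pvInterLoop d.values (PySem.Set.ofList ordered_source)
    ordered_source.filter (fun market => PySem.Set.contains intersection market)

-- ===== PORT B =====
-- 'for values in d.values(): for market in set(values): counts[market] = counts.get(market, 0) + 1'
def pvCounts (vlists : List (List String)) : PySem.Dict String Int :=
  vlists.foldl
    (fun counts v => (PySem.Set.ofList v).foldl (fun c market => c.insert market (c.getD market 0 + 1)) counts)
    PySem.Dict.empty

def panel_order_preserving_intersection_py_alt (markets_by_expert : List (String × List String)) : List String :=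
  let d := PySem.Dict.ofList markets_by_expert
  let ordered_source := (d.get? "panel").getD []
  let ordered_source := if ordered_source = [] then pvFirstNonEmpty d.values else ordered_source
  if ordered_source = [] then []
  else
    let counts := pvCounts d.values
    let n : Int := d.size
    let common : PySem.Set String :=
      PySem.Set.ofList ((counts.items.filter (fun p => p.2 == n)).map (·.1))
    ordered_source.filter (fun market => PySem.Set.contains common market)

-- ===== PRECONDITION & SPEC =====
def Spec_panel_order_preserving_intersection_py (markets_by_expert : List (String × List String)) (out : List String) : Prop := out = panel_order_preserving_intersection_py_alt markets_by_expert
instance (markets_by_expert : List (String × List String)) (out : List String) : Decidable (Spec_panel_order_preserving_intersection_py markets_by_expert out) := by unfold Spec_panel_order_preserving_intersection_py; infer_instance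

-- ===== CLAIM (what is proved, stated in full; the proofs are below) =====
def Claim_equal_panel_order_preserving_intersection_py : Prop := ∀ (markets_by_expert : List (String × List String)), Dom_panel_order_preserving_intersection_py markets_by_expert → Spec_panel_order_preserving_intersection_py markets_by_expert (panel_order_preserving_intersection_py markets_by_expert)

-- ===== LEMMAS AND PROOFS =====

-- membership after A's intersection loop: in the start set and in every expert list
theorem pvInterLoop_mem (vs : List (List String)) (s : PySem.Set String) (m : String) :
    m ∈ pvInterLoop vs s ↔ m ∈ s ∧ ∀ v ∈ vs, m ∈ v := by
  induction vs generalizing s with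
  | nil => simp [pvInterLoop]
  | cons v rest ih =>
    by_cases hv : v = []
    · subst hv; simp [pvInterLoop, PySem.Set.empty]
    · simp only [pvInterLoop, if_neg hv, ih, PySem.Set.mem_inter, PySem.Set.mem_ofList,
        List.forall_mem_cons]
      tauto

-- B's counter counts, per market, the number of expert lists containing it
theorem pvCounts_getD_aux (vs : List (List String)) (c : PySem.Dict String Int) (m : String) :
    (vs.foldl
      (fun counts v => (PySem.Set.ofList v).foldl (fun c market => c.insert market (c.getD market 0 + 1)) counts)
      c).getD m 0
      = c.getD m 0 + (vs.countP (fun v => decide (m ∈ v)) : Int) := by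
  induction vs generalizing c with
  | nil => simp
  | cons v rest ih =>
    rw [List.foldl_cons, ih, PySem.Dict.getD_foldl_insert_add_one, List.countP_cons]
    by_cases hm : m ∈ v
    · rw [List.count_eq_one_of_mem (PySem.Set.nodup_ofList v) ((PySem.Set.mem_ofList v m).2 hm)]
      simp [hm]; ring
    · rw [List.count_eq_zero.2 (fun h => hm ((PySem.Set.mem_ofList v m).1 h))]
      simp [hm]

theorem pvCounts_getD (vs : List (List String)) (m : String) :
    (pvCounts vs).getD m 0 = (vs.countP (fun v => decide (m ∈ v)) : Int) := by
  have := pvCounts_getD_aux vs PySem.Dict.empty m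
  simpa [pvCounts, PySem.Dict.getD_empty] using this

theorem pvCounts_keys_nodup (vs : List (List String)) : (pvCounts vs).keys.Nodup := by
  unfold pvCounts
  have h : ∀ (c : PySem.Dict String Int), c.keys.Nodup →
      (vs.foldl
        (fun counts v => (PySem.Set.ofList v).foldl (fun c market => c.insert market (c.getD market 0 + 1)) counts)
        c).keys.Nodup := by
    induction vs with
    | nil => intro c hc; simpa using hc
    | cons v rest ih =>
      intro c hc
      exact ih _ (PySem.Dict.nodup_keys_foldl_insert _ _ _ hc)
  exact h _ PySem.Dict.nodup_keys_empty

-- membership in B's 'common' set, when there is at least one expert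
theorem pv_mem_common (vs : List (List String)) (n : Int) (hn : 1 ≤ n) (m : String) :
    (m ∈ PySem.Set.ofList ((((pvCounts vs).items.filter (fun p => p.2 == n)).map (·.1)))
      ↔ (pvCounts vs).getD m 0 = n) := by
  rw [PySem.Set.mem_ofList]
  constructor
  · intro h
    rcases List.mem_map.1 h with ⟨p, hp, rfl⟩
    rcases List.mem_filter.1 hp with ⟨hpi, hpn⟩
    have hpn' : p.2 = n := by simpa using hpn
    have hg := PySem.Dict.getD_of_mem_items (d := pvCounts vs) (k := p.1) (v := p.2)
      hpi (pvCounts_keys_nodup vs) (d0 := 0)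
    rw [hg, hpn']
  · intro h
    have hc : (pvCounts vs).contains m = true := by
      cases hx : (pvCounts vs).contains m
      · have h0 := PySem.Dict.getD_of_not_contains (d := pvCounts vs) (k := m) (d0 := (0 : Int)) hx
        rw [h0] at h; omega
      · rfl
    have hsome : (pvCounts vs).get? m = some n := by
      rcases hg : (pvCounts vs).get? m with _ | c
      · have hfx : (pvCounts vs).contains m = false := by
          rw [PySem.Dict.contains_eq_isSome_get?, hg]; rfl
        rw [hfx] at hc; cases hc
      · have hgd : (pvCounts vs).getD m 0 = c := PySem.Dict.getD_of_get?_eq_some _ _ hg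
        rw [hgd] at h
        rw [h]
    have hmem : (m, n) ∈ (pvCounts vs).items := PySem.Dict.mem_items_of_get?_eq_some _ hsome
    exact List.mem_map.2 ⟨(m, n), List.mem_filter.2 ⟨hmem, by simp⟩, rfl⟩

-- a nonempty first-nonempty-values resolution needs a nonempty dict
theorem pv_ne_nil_of_first (d : PySem.Dict String (List String))
    (h : pvFirstNonEmpty d.values ≠ []) : d.items ≠ [] := by
  intro hnil
  have hd : d = PySem.Dict.mk [] := PySem.Dict.ext hnil
  subst hd
  simp [pvFirstNonEmpty, PySem.Dict.values] at h

-- a present "panel" key needs a nonempty dict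
theorem pv_ne_nil_of_panel (d : PySem.Dict String (List String))
    (h : (d.get? "panel").getD [] ≠ []) : d.items ≠ [] := by
  intro hnil
  have hd : d = PySem.Dict.mk [] := PySem.Dict.ext hnil
  subst hd
  simp [PySem.Dict.get?] at h

-- per-element agreement of the two filter predicates, for a nonempty dict
theorem pv_pred_eq (d : PySem.Dict String (List String)) (os : List String)
    (hne : d.items ≠ []) (m : String) (hm : m ∈ os) :
    (pvInterLoop d.values (PySem.Set.ofList os)).contains m
      = (PySem.Set.ofList ((((pvCounts d.values).items.filter (fun p => p.2 == (d.size : Int))).map (·.1)))).contains m := by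
  have hn : (1 : Int) ≤ ((d.size : Int)) := by
    have hpos : 0 < d.items.length := List.length_pos_iff.2 hne
    simp only [PySem.Dict.size]
    omega
  rw [Bool.eq_iff_iff, PySem.Set.contains_iff, PySem.Set.contains_iff]
  rw [pvInterLoop_mem, PySem.Set.mem_ofList]
  rw [pv_mem_common d.values _ hn m, pvCounts_getD]
  have hsz : d.values.length = d.size := by
    simp [PySem.Dict.values, PySem.Dict.size]
  constructor
  · rintro ⟨-, hall⟩
    have hcl : d.values.countP (fun v => decide (m ∈ v)) = d.values.length :=
      List.countP_eq_length.2 (fun v hv => by simpa using hall v hv)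
    rw [hcl, hsz]
  · intro hcount
    refine ⟨hm, fun v hv => ?_⟩
    have heq : d.values.countP (fun v => decide (m ∈ v)) = d.values.length := by
      rw [← hsz] at hcount; exact_mod_cast hcount
    have := List.countP_eq_length.1 heq v hv
    simpa using this

-- ===== VERDICT (by name: the statement is the Claim_ definition above) =====
theorem panel_order_preserving_intersection_py_spec : Claim_equal_panel_order_preserving_intersection_py := by
  intro mbe _
  unfold Spec_panel_order_preserving_intersection_py
  simp only [panel_order_preserving_intersection_py, panel_order_preserving_intersection_py_alt]
  split
  next hpanel =>
    split
    next h2 => rfl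
    next h2 =>
      exact List.filter_congr fun m hm => pv_pred_eq _ _ (pv_ne_nil_of_first _ h2) m hm
  next hpanel =>
    exact List.filter_congr fun m hm => pv_pred_eq _ _ (pv_ne_nil_of_panel _ hpanel) m hm
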